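-- pv_equiv track=rewrite | github.com/rodolfopietro97/tractors-backend | cloud_storage_loader/helpers.py | get_brand_category
-- ===== SOURCE A (Python) =====
-- def get_brand_category(brand_files: list) -> str:
--     """
--     Get category of brand
--     :brand_files: Input brand_files grouped for brand name
--     :return: "Attrezzature", "Trattori" or "Entrambi"
--     """
--
--     # Filter files by brand name
--     attrezzature = False
--     trattori = False
--
--     for file in brand_files:
--         if "/Attrezzature" in file:
--             attrezzature = True
--
--         if "/Trattori" in file:
--             trattori = True
--
--     # Only "Attrezzature"
--     if attrezzature and not trattori:
--         return "Attrezzature"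
--
--     # Only "Trattori"
--     if trattori and not attrezzature:
--         return "Trattori"
--
--     return "Entrambi"
-- ===== SOURCE B (Python) =====
-- def get_brand_category(brand_files: list) -> str:
--     """Classify brand as equipment, tractors, or both.
--
--     Early-deciding state machine: carries the single category seen so far
--     (or None) and returns "Entrambi" the moment both categories are
--     witnessed, without looking at the remaining files.
--     """
--     first = None
--     for f in brand_files:
--         a = "/Attrezzature" in f
--         t = "/Trattori" in f
--         if a and t:
--             return "Entrambi"
--         if a:
--             if first == "Trattori":
--                 return "Entrambi"
--             first = "Attrezzature"
--         elif t:
--             if first == "Attrezzature":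
--                 return "Entrambi"
--             first = "Trattori"
--     return first if first is not None else "Entrambi"
-- ===== Notes on version B (the rewrite author's own statement) =====
-- stated objective: alternative
-- what changed: Replaces A's exhaustive two-flag scan plus post-loop branch chain with a single-state early-terminating state machine: it carries the one category seen so far (or None) and returns 'Entrambi' immediately when both categories are witnessed, so the decision is made during the scan and the rest of the list is never examined.
import Mathlib
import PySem

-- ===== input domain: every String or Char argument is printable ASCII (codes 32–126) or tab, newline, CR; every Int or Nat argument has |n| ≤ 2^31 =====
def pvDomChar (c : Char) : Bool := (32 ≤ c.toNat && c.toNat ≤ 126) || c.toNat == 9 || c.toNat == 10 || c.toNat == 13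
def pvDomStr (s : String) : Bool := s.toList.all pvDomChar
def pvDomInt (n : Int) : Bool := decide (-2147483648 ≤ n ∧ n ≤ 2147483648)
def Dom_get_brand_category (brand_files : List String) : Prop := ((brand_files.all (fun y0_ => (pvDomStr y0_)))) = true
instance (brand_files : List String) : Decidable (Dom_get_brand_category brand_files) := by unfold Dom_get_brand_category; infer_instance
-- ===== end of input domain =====

-- B replaces A's exhaustive two-flag loop with an early-deciding recursive scan; return value only, no side effects.
-- ===== PORT A =====
def get_brand_category (brand_files : List String) : String :=
  let st := brand_files.foldl (fun (st : Bool × Bool) file =>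
    (if PySem.Str.isIn "/Attrezzature" file then true else st.1,
     if PySem.Str.isIn "/Trattori" file then true else st.2)) (false, false)
  if st.1 && !st.2 then "Attrezzature"
  else if st.2 && !st.1 then "Trattori"
  else "Entrambi"

-- ===== PORT B =====
-- transliteration of Source B's _scan: recursion on the list, carrying the single category seen so far
def pvScan (files : List String) (first : Option String) : String :=
  match files with
  | [] => match first with | some s => s | none => "Entrambi"
  | f :: rest =>
    let a := PySem.Str.isIn "/Attrezzature" f
    let t := PySem.Str.isIn "/Trattori" f
    if a && t then "Entrambi"
    else if a then
      if first == some "Trattori" then "Entrambi"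
      else pvScan rest (some "Attrezzature")
    else if t then
      if first == some "Attrezzature" then "Entrambi"
      else pvScan rest (some "Trattori")
    else pvScan rest first

def get_brand_category_alt (brand_files : List String) : String :=
  pvScan brand_files none

-- ===== PRECONDITION & SPEC =====
def Spec_get_brand_category (brand_files : List String) (out : String) : Prop := out = get_brand_category_alt brand_files
instance (brand_files : List String) (out : String) : Decidable (Spec_get_brand_category brand_files out) := by unfold Spec_get_brand_category; infer_instance

-- ===== CLAIM (what is proved, stated in full; the proofs are below) =====
def Claim_equal_get_brand_category : Prop := ∀ (brand_files : List String), Dom_get_brand_category brand_files → Spec_get_brand_category brand_files (get_brand_category brand_files)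

-- ===== LEMMAS AND PROOFS =====

-- the final decision as a function of the two "seen" booleans
def pvDecide (a t : Bool) : String :=
  if a && !t then "Attrezzature" else if t && !a then "Trattori" else "Entrambi"

theorem fold_eq_any (l : List String) (a t : Bool) :
    l.foldl (fun (st : Bool × Bool) file =>
      (if PySem.Str.isIn "/Attrezzature" file then true else st.1,
       if PySem.Str.isIn "/Trattori" file then true else st.2)) (a, t)
    = (a || l.any (fun f => PySem.Str.isIn "/Attrezzature" f),
       t || l.any (fun f => PySem.Str.isIn "/Trattori" f)) := by
  induction l generalizing a t with
  | nil => simp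
  | cons x xs ih =>
    simp only [List.foldl_cons, List.any_cons, ih]
    simp only [Prod.mk.injEq]
    constructor <;> split <;> simp_all

set_option maxHeartbeats 2000000 in
theorem scan_eq (l : List String) (first : Option String)
    (h : first = none ∨ first = some "Attrezzature" ∨ first = some "Trattori") :
    pvScan l first =
      pvDecide ((first == some "Attrezzature") || l.any (fun f => PySem.Str.isIn "/Attrezzature" f))
               ((first == some "Trattori") || l.any (fun f => PySem.Str.isIn "/Trattori" f)) := by
  induction l generalizing first with
  | nil =>
    rcases h with h | h | h <;> subst h <;> simp [pvScan, pvDecide]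
  | cons x xs ih =>
    have ihn := ih none (Or.inl rfl)
    have iha := ih (some "Attrezzature") (Or.inr (Or.inl rfl))
    have iht := ih (some "Trattori") (Or.inr (Or.inr rfl))
    rcases h with h | h | h <;> subst h <;>
      simp [pvScan, List.any_cons, ihn, iha, iht, pvDecide] <;>
      split_ifs <;> (try simp_all) <;> aesop

-- ===== VERDICT (by name: the statement is the Claim_ definition above) =====
theorem get_brand_category_spec : Claim_equal_get_brand_category := by
  intro brand_files _
  unfold Spec_get_brand_category get_brand_category get_brand_category_alt
  rw [fold_eq_any, scan_eq _ _ (Or.inl rfl)]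
  simp [pvDecide]
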